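-- pv_equiv track=rewrite | github.com/CAMwebscraper/-CAM-LEQ-SCRAPERS | LEQ_Scraping_v1.py | procesar_seleccion_especialidades
-- ===== SOURCE A (Python) =====
-- def procesar_seleccion_especialidades(seleccion, especialidades):
--     """Procesa la selección del usuario para especialidades"""
--     seleccionadas = []
--
--     seleccion_upper = seleccion.upper()
--
--     if seleccion_upper == 'TODOS':
--         return especialidades
--     elif seleccion_upper == 'NINGUNO':
--         # Devolver lista vacía para indicar "sin filtro"
--         return []
--
--     # Rango (ej: 1-5)
--     if '-' in seleccion:
--         try:
--             inicio, fin = map(int, seleccion.split('-'))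
--             for i in range(inicio, fin + 1):
--                 if 1 <= i <= len(especialidades):
--                     seleccionadas.append(especialidades[i-1])
--         except:
--             pass
--
--     # Múltiples números (ej: 1,3,5)
--     elif ',' in seleccion:
--         try:
--             numeros = [int(n.strip()) for n in seleccion.split(',')]
--             for num in numeros:
--                 if 1 <= num <= len(especialidades):
--                     seleccionadas.append(especialidades[num-1])
--         except:
--             pass
--
--     # Un solo número
--     else:
--         try:
--             num = int(seleccion)
--             if 1 <= num <= len(especialidades):
--                 seleccionadas.append(especialidades[num-1])
--         except:
--             pass
--
--     return seleccionadas
-- ===== SOURCE B (Python) =====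
-- def procesar_seleccion_especialidades(seleccion, especialidades):
--     """Procesa la seleccion del usuario para especialidades"""
--     su = seleccion.upper()
--     if su == 'TODOS':
--         return especialidades
--     if su == 'NINGUNO':
--         return []
--     try:
--         if '-' in seleccion:
--             # closed-form: the valid part of the range is a contiguous slice
--             inicio, fin = map(int, seleccion.split('-'))
--             return especialidades[max(inicio, 1) - 1 : max(fin, 0)]
--         nums = [int(p.strip()) for p in seleccion.split(',')] if ',' in seleccion else [int(seleccion)]
--     except ValueError:
--         return []
--     out = []
--     for i in nums:
--         if i >= 1:
--             out += especialidades[i - 1 : i]   # [] automatically when i > len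
--     return out
-- ===== Notes on version B (the rewrite author's own statement) =====
-- stated objective: alternative
-- what changed: B replaces A's per-index bounds-checked append loops by slice arithmetic: the '-' range becomes one closed-form slice especialidades[max(inicio,1)-1:max(fin,0)] (no loop at all), and the comma/single cases concatenate one-element slices especialidades[i-1:i], whose automatic clamping replaces A's explicit upper-bound check.
import Mathlib
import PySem

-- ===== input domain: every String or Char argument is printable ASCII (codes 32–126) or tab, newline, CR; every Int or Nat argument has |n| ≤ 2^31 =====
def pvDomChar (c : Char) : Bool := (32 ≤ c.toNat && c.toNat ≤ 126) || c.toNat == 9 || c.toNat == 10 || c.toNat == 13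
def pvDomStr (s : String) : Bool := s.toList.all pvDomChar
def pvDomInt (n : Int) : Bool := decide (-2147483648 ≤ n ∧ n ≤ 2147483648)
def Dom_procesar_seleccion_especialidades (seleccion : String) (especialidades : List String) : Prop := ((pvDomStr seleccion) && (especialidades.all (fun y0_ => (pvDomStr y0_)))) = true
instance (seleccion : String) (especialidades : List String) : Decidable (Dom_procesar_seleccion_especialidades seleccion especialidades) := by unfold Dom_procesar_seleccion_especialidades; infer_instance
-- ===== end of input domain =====

-- B replaces A's per-index bounds-checked append loops by slice arithmetic: one closed-form slice
-- for the '-' range and concatenation of self-clamping one-element slices for the other cases.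

-- ===== PORT A =====
def procesar_seleccion_especialidades (seleccion : String) (especialidades : List String) : List String :=
  let seleccion_upper := PySem.Str.upper seleccion
  if seleccion_upper = "TODOS" then especialidades
  else if seleccion_upper = "NINGUNO" then []
  else if PySem.Str.isIn "-" seleccion then
    -- inicio, fin = map(int, seleccion.split('-')) — any split arity ≠ 2 or parse failure raises, caught by 'except: pass'
    match (PySem.Str.split? seleccion "-").getD [] with
    | [s1, s2] =>
      match PySem.Int.ofStr? s1, PySem.Int.ofStr? s2 with
      | some inicio, some fin =>
          (PySem.List.pyRange inicio (fin + 1) 1).foldl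
            (fun acc i =>
              if 1 ≤ i ∧ i ≤ (especialidades.length : Int) then
                acc ++ [(PySem.List.pyGet? especialidades (i - 1)).getD ""]
              else acc) []
      | _, _ => []
    | _ => []
  else if PySem.Str.isIn "," seleccion then
    -- numeros = [int(n.strip()) for n in seleccion.split(',')] — one failure aborts the whole parse
    match ((PySem.Str.split? seleccion ",").getD []).mapM (fun p => PySem.Int.ofStr? (PySem.Str.strip p)) with
    | some numeros =>
        numeros.foldl
          (fun acc num =>
            if 1 ≤ num ∧ num ≤ (especialidades.length : Int) then
              acc ++ [(PySem.List.pyGet? especialidades (num - 1)).getD ""]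
            else acc) []
    | none => []
  else
    match PySem.Int.ofStr? seleccion with
    | some num =>
        if 1 ≤ num ∧ num ≤ (especialidades.length : Int) then
          [(PySem.List.pyGet? especialidades (num - 1)).getD ""]
        else []
    | none => []

-- ===== PORT B =====
def procesar_seleccion_especialidades_alt (seleccion : String) (especialidades : List String) : List String :=
  let su := PySem.Str.upper seleccion
  if su = "TODOS" then especialidades
  else if su = "NINGUNO" then []
  else if PySem.Str.isIn "-" seleccion then
    -- inicio, fin = map(int, seleccion.split('-')); return especialidades[max(inicio,1)-1 : max(fin,0)]
    let parts := (PySem.Str.split? seleccion "-").getD []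
    (if hp : parts.length = 2 then
       (PySem.Int.ofStr? (parts[0]'(by omega))).bind fun inicio =>
         (PySem.Int.ofStr? (parts[1]'(by omega))).map fun fin =>
           PySem.List.slice especialidades (some (max inicio 1 - 1)) (some (max fin 0))
     else none).getD []
  else
    -- nums = [int(p.strip()) for p in seleccion.split(',')] if ',' in seleccion else [int(seleccion)]
    ((if PySem.Str.isIn "," seleccion then
        ((PySem.Str.split? seleccion ",").getD []).mapM (fun p => PySem.Int.ofStr? (PySem.Str.strip p))
      else (PySem.Int.ofStr? seleccion).map (fun n => [n])).map
      (fun nums =>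
        -- out += especialidades[i-1:i] for each i >= 1; the slice clamps past-the-end to []
        nums.foldl
          (fun out i =>
            if 1 ≤ i then out ++ PySem.List.slice especialidades (some (i - 1)) (some i)
            else out) [])).getD []

-- ===== PRECONDITION & SPEC =====
def Spec_procesar_seleccion_especialidades (seleccion : String) (especialidades : List String) (out : List String) : Prop := out = procesar_seleccion_especialidades_alt seleccion especialidades
instance (seleccion : String) (especialidades : List String) (out : List String) : Decidable (Spec_procesar_seleccion_especialidades seleccion especialidades out) := by unfold Spec_procesar_seleccion_especialidades; infer_instance

-- ===== CLAIM =====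
def Claim_equal_procesar_seleccion_especialidades : Prop := ∀ (seleccion : String) (especialidades : List String), Dom_procesar_seleccion_especialidades seleccion especialidades → Spec_procesar_seleccion_especialidades seleccion especialidades (procesar_seleccion_especialidades seleccion especialidades)

-- ===== LEMMAS AND PROOFS =====

-- A's guarded single pick equals B's self-clamping one-element slice.
theorem pv_elem (e : List String) (i : Int) :
    (if 1 ≤ i ∧ i ≤ (e.length : Int) then [(PySem.List.pyGet? e (i - 1)).getD ""] else [])
      = (if 1 ≤ i then PySem.List.slice e (some (i - 1)) (some i) else []) := by
  by_cases h1 : 1 ≤ i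
  · have hpg : PySem.List.pyGet? e (i - 1) = e[i.toNat - 1]? := by
      rw [show i - 1 = ((i.toNat - 1 : Nat) : Int) from by omega, PySem.List.pyGet?_natCast]
    rw [if_pos h1, PySem.List.slice_toNat e (by omega) (by omega)]
    have hk : i.toNat - (i - 1).toNat = 1 := by omega
    have hk2 : (i - 1).toNat = i.toNat - 1 := by omega
    rw [hk, hk2]
    by_cases h2 : i ≤ (e.length : Int)
    · rw [if_pos ⟨h1, h2⟩, hpg]
      have hlt : i.toNat - 1 < e.length := by omega
      rw [List.getElem?_eq_getElem hlt, Option.getD_some, List.drop_eq_getElem_cons hlt]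
      rfl
    · rw [if_neg (by omega)]
      rw [List.drop_eq_nil_of_le (by omega)]
      simp
  · rw [if_neg (by omega), if_neg h1]

-- A's bounds-checked append fold and B's slice-append fold agree for any number list.
theorem pv_fold_eq (e : List String) (nums : List Int) (acc : List String) :
    nums.foldl
      (fun acc i =>
        if 1 ≤ i ∧ i ≤ (e.length : Int) then
          acc ++ [(PySem.List.pyGet? e (i - 1)).getD ""]
        else acc) acc
    = nums.foldl
      (fun out i =>
        if 1 ≤ i then out ++ PySem.List.slice e (some (i - 1)) (some i)
        else out) acc := by
  induction nums generalizing acc with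
  | nil => rfl
  | cons x xs ih =>
    simp only [List.foldl_cons]
    have hstep :
        (if 1 ≤ x ∧ x ≤ (e.length : Int) then acc ++ [(PySem.List.pyGet? e (x - 1)).getD ""] else acc)
          = (if 1 ≤ x then acc ++ PySem.List.slice e (some (x - 1)) (some x) else acc) := by
      have := pv_elem e x
      split_ifs at this ⊢ <;> simp_all
    rw [hstep, ih]

-- splitting a slice at an interior point (Nat indices k ≤ a ≤ b)
theorem pv_slice_split (e : List String) (k a b : Nat) (h1 : k ≤ a) (h2 : a ≤ b) :
    (e.drop k).take (b - k) = (e.drop k).take (a - k) ++ (e.drop a).take (b - a) := by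
  have hb : b - k = (a - k) + (b - a) := by omega
  rw [hb, List.take_add, List.drop_drop]
  congr 3
  omega

-- A's range fold equals B's closed-form clamped slice.
theorem pv_range_slice (e : List String) (a b : Int) :
    (PySem.List.pyRange a (b + 1) 1).foldl
      (fun out i =>
        if 1 ≤ i then out ++ PySem.List.slice e (some (i - 1)) (some i)
        else out) []
    = PySem.List.slice e (some (max a 1 - 1)) (some (max b 0)) := by
  rw [show (fun (out : List String) (i : Int) =>
        if 1 ≤ i then out ++ PySem.List.slice e (some (i - 1)) (some i) else out)
      = (fun out i => out ++ if 1 ≤ i then PySem.List.slice e (some (i - 1)) (some i) else [])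
      from by funext out i; split <;> simp,
    PySem.List.foldl_append_eq_flatMap, List.nil_append]
  by_cases hab : b + 1 ≤ a
  · rw [PySem.List.pyRange_one_eq_nil hab,
      PySem.List.slice_toNat e (by omega) (by omega)]
    have h0 : (max b 0).toNat - (max a 1 - 1).toNat = 0 := by omega
    rw [h0]
    simp
  · rw [PySem.List.pyRange_one_cons (by omega : a < b + 1), List.flatMap_cons]
    have ih := pv_range_slice e (a + 1) b
    rw [show (fun (out : List String) (i : Int) =>
          if 1 ≤ i then out ++ PySem.List.slice e (some (i - 1)) (some i) else out)
        = (fun out i => out ++ if 1 ≤ i then PySem.List.slice e (some (i - 1)) (some i) else [])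
        from by funext out i; split <;> simp,
      PySem.List.foldl_append_eq_flatMap, List.nil_append] at ih
    rw [ih]
    by_cases ha : 1 ≤ a
    · rw [if_pos ha]
      have h1 : max a 1 - 1 = a - 1 := by omega
      have h2 : max (a + 1) 1 - 1 = a := by omega
      have h3 : max b 0 = b := by omega
      rw [h1, h2, h3,
        PySem.List.slice_toNat e (by omega : (0:Int) ≤ a - 1) (by omega : (0:Int) ≤ a),
        PySem.List.slice_toNat e (by omega : (0:Int) ≤ a - 1) (by omega : (0:Int) ≤ b),
        PySem.List.slice_toNat e (by omega : (0:Int) ≤ a) (by omega : (0:Int) ≤ b)]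
      rw [pv_slice_split e (a - 1).toNat a.toNat b.toNat (by omega) (by omega)]
    · rw [if_neg ha, List.nil_append]
      congr 2
      omega
  termination_by (b + 1 - a).toNat
  decreasing_by omega

-- A's '-' branch (list-pattern unpack + bounds-checked fold) equals B's dite/slice form.
theorem pv_dash_branch (especialidades : List String) (parts : List String) :
    (match parts with
      | [s1, s2] =>
        match PySem.Int.ofStr? s1, PySem.Int.ofStr? s2 with
        | some inicio, some fin =>
            (PySem.List.pyRange inicio (fin + 1) 1).foldl
              (fun acc i =>
                if 1 ≤ i ∧ i ≤ (especialidades.length : Int) then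
                  acc ++ [(PySem.List.pyGet? especialidades (i - 1)).getD ""]
                else acc) []
        | _, _ => []
      | _ => ([] : List String))
    = (if hp : parts.length = 2 then
         (PySem.Int.ofStr? (parts[0]'(by omega))).bind fun inicio =>
           (PySem.Int.ofStr? (parts[1]'(by omega))).map fun fin =>
             PySem.List.slice especialidades (some (max inicio 1 - 1)) (some (max fin 0))
       else none).getD [] := by
  rcases parts with _ | ⟨s1, _ | ⟨s2, _ | _⟩⟩
  · rfl
  · rfl
  · simp only [List.length_cons, List.length_nil, Nat.reduceAdd, reduceDIte,
      List.getElem_cons_zero, List.getElem_cons_succ]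
    rcases hi : PySem.Int.ofStr? s1 with _ | inicio <;>
      rcases hf : PySem.Int.ofStr? s2 with _ | fin <;>
        simp_all only [Option.bind_none, Option.bind_some, Option.map_none,
          Option.map_some, Option.getD_none, Option.getD_some]
    rw [pv_fold_eq, pv_range_slice]
  · rfl

-- ===== VERDICT =====
theorem procesar_seleccion_especialidades_spec : Claim_equal_procesar_seleccion_especialidades := by
  intro seleccion especialidades _
  unfold Spec_procesar_seleccion_especialidades
  unfold procesar_seleccion_especialidades procesar_seleccion_especialidades_alt
  by_cases h1 : PySem.Str.upper seleccion = "TODOS"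
  · simp [h1]
  · by_cases h2 : PySem.Str.upper seleccion = "NINGUNO"
    · simp [h2]
    · simp only [h1, h2, if_false]
      by_cases h3 : PySem.Str.isIn "-" seleccion = true
      · simp only [h3, if_true]
        exact pv_dash_branch especialidades ((PySem.Str.split? seleccion "-").getD [])
      · simp only [h3, if_false, Bool.false_eq_true]
        by_cases h4 : PySem.Str.isIn "," seleccion = true
        · simp only [h4, if_true]
          rcases hm : ((PySem.Str.split? seleccion ",").getD []).mapM
              (fun p => PySem.Int.ofStr? (PySem.Str.strip p)) with _ | numeros <;>
            simp_all only [Option.map_none, Option.map_some, Option.getD_none, Option.getD_some]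
          exact pv_fold_eq especialidades numeros []
        · simp only [h4, if_false, Bool.false_eq_true]
          rcases hn : PySem.Int.ofStr? seleccion with _ | num <;>
            simp_all only [Option.map_none, Option.map_some, Option.getD_none, Option.getD_some,
              List.foldl_cons, List.foldl_nil]
          rw [pv_elem]
          split <;> simp
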